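-- pv_equiv track=rewrite | github.com/ThunderXBlitZ/Annagram_Bot | src/anagram_engine.py | process_word_list
-- ===== SOURCE A (Python) =====
-- def remove_anagram(word_list):
--     # Create a counting dictionary by sorting letters in words
--     sorted_dict = {}
--     for word in word_list:
--         word_sorted = ''.join(sorted(word))
--         if word_sorted not in sorted_dict.keys():
--             sorted_dict[word_sorted] = 1
--         else:
--             sorted_dict[word_sorted] += 1
--
--     # iterate again
--     word_list_clean = [x for x in word_list if sorted_dict[''.join(sorted(x))] == 1]
--     return word_list_clean
--
-- def process_word_list(word_list):
--     """
--     Takes in list of words, splits them by length and remove anagrams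
--     :param word_list: list of words
--     :return: dictionary where key is length of word, value is list of words
--     """
--
--     word_list = remove_anagram(word_list)
--
--     # split by word length
--     words_dict = {}
--     for word in word_list:
--         length = len(word)
--         if length in words_dict.keys():
--             words_dict[length].append(word)
--         else:
--             words_dict[length] = [word]
--
--     return words_dict
-- ===== SOURCE B (Python) =====
-- def process_word_list(word_list):
--     """
--     Takes in list of words, splits them by length and remove anagrams
--     :param word_list: list of words
--     :return: dictionary where key is length of word, value is list of words
--     """
--     # single pass: a word survives iff no OTHER position holds an anagram of it
--     # (pairwise brute-force check instead of a signature-counting dictionary);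
--     # survivors are bucketed by length immediately.
--     words_dict = {}
--     for i, word in enumerate(word_list):
--         if all(i == j or sorted(u) != sorted(word) for j, u in enumerate(word_list)):
--             words_dict.setdefault(len(word), []).append(word)
--     return words_dict
-- ===== Notes on version B (the rewrite author's own statement) =====
-- stated objective: alternative
-- what changed: Replaces A's three staged passes (build a signature-count dictionary, filter the list by recomputed signatures, then bucket by length) with a single pass that decides each word's survival by a pairwise brute-force anagram scan over the other positions and buckets survivors immediately; no counting dictionary exists.
import Mathlib
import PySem

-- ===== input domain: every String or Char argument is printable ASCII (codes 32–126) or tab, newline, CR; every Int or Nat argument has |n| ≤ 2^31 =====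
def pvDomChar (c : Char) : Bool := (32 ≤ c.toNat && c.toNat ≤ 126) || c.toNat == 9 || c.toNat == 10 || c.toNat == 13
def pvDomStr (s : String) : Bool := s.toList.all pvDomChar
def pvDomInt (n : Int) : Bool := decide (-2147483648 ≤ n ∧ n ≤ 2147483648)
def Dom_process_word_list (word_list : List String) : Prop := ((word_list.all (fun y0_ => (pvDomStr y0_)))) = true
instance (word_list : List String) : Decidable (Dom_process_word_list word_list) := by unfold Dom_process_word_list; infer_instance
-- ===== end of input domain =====

-- B replaces A's three staged passes (signature-count dict, filter, length-bucket) by one pass with a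
-- pairwise brute-force anagram scan over the other positions (alternative decomposition, not faster).

-- ===== PORT A =====
-- ''.join(sorted(word)): joining single-character strings with '' is exactly String.ofList of the sorted character list
def pvSortLetters (word : String) : String :=
  String.ofList (PySem.List.sorted word.toList (fun c => c))

def remove_anagram (word_list : List String) : List String :=
  let sorted_dict : PySem.Dict String Int := word_list.foldl
    (fun d word =>
      let word_sorted := pvSortLetters word
      if !d.contains word_sorted then d.insert word_sorted 1
      else d.insert word_sorted (d.getD word_sorted 0 + 1))  -- key present in this branch, so getD _ 0 reads the stored count
    PySem.Dict.empty
  word_list.filter (fun x => sorted_dict.getD (pvSortLetters x) 0 == 1)  -- key always present, so getD _ 0 is sorted_dict[...]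

def process_word_list (word_list : List String) : List (Int × List String) :=
  let wl := remove_anagram word_list
  (wl.foldl
    (fun (d : PySem.Dict Int (List String)) word =>
      let length := PySem.Str.len word
      if d.contains length then d.modify length [] (fun g => g ++ [word])  -- words_dict[length].append(word)
      else d.insert length [word])
    PySem.Dict.empty).items

-- ===== PORT B =====
-- sorted(word): the character list B compares directly
def pvSig (word : String) : List Char :=
  PySem.List.sorted word.toList (fun c => c)

def process_word_list_alt (word_list : List String) : List (Int × List String) :=
  ((PySem.List.enumerate word_list).foldl
    (fun (d : PySem.Dict Int (List String)) p =>
      if (PySem.List.enumerate word_list).all (fun q => p.1 == q.1 || !(pvSig q.2 == pvSig p.2))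
      then d.modify (PySem.Str.len p.2) [] (fun g => g ++ [p.2])  -- setdefault(len(word), []).append(word)
      else d)
    PySem.Dict.empty).items

-- ===== PRECONDITION & SPEC =====
def Spec_process_word_list (word_list : List String) (out : List (Int × List String)) : Prop := out = process_word_list_alt word_list
instance (word_list : List String) (out : List (Int × List String)) : Decidable (Spec_process_word_list word_list out) := by unfold Spec_process_word_list; infer_instance

-- ===== CLAIM (what is proved, stated in full; the proofs are below) =====
def Claim_equal_process_word_list : Prop := ∀ (word_list : List String), Dom_process_word_list word_list → Spec_process_word_list word_list (process_word_list word_list)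

-- ===== LEMMAS AND PROOFS =====

lemma pv_enum_cons {α : Type} (x : α) (t : List α) (s : Int) :
    PySem.List.enumerate (x :: t) s = (s, x) :: PySem.List.enumerate t (s + 1) := rfl

lemma pv_enum_map_snd {α : Type} (xs : List α) (s : Int) :
    (PySem.List.enumerate xs s).map (·.2) = xs := by
  induction xs generalizing s with
  | nil => rfl
  | cons x t ih => simp [PySem.List.enumerate, ih]

lemma pv_enum_fst_lb {α : Type} (xs : List α) (s : Int) :
    ∀ q ∈ PySem.List.enumerate xs s, s ≤ q.1 := by
  induction xs generalizing s with
  | nil => simp [PySem.List.enumerate]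
  | cons x t ih =>
    intro q hq
    rw [pv_enum_cons] at hq
    rcases List.mem_cons.mp hq with hq | hq
    · simp [hq]
    · have := ih (s + 1) q hq; omega

lemma pv_mem_of_mem_enum {α : Type} {xs : List α} {s : Int} {q : Int × α}
    (h : q ∈ PySem.List.enumerate xs s) : q.2 ∈ xs := by
  have := List.mem_map_of_mem (f := (·.2)) h
  rwa [pv_enum_map_snd] at this

-- B's survival test at position (i, w): "no other position holds a P-element" ↔ P holds exactly once
lemma pv_all_iff_countP_one {α : Type} (P : α → Bool) :
    ∀ (xs : List α) (s i : Int) (w : α), (i, w) ∈ PySem.List.enumerate xs s → P w = true →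
      (((PySem.List.enumerate xs s).all (fun q => i == q.1 || !(P q.2)) = true) ↔ xs.countP P = 1) := by
  intro xs
  induction xs with
  | nil => intro s i w h; simp [PySem.List.enumerate] at h
  | cons x t ih =>
    intro s i w hmem hP
    rw [pv_enum_cons] at hmem ⊢
    rw [List.all_cons, List.countP_cons]
    rcases List.mem_cons.mp hmem with h | h
    · rw [Prod.mk.injEq] at h
      obtain ⟨hi, hweq⟩ := h
      subst hweq; subst hi
      simp only [hP, Bool.not_true, beq_self_eq_true, Bool.true_or, Bool.true_and, reduceIte]
      constructor
      · intro hall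
        have h0 : t.countP P = 0 := by
          rw [List.countP_eq_zero]
          intro a ha
          rw [← pv_enum_map_snd t (i + 1)] at ha
          obtain ⟨q, hq, hqa⟩ := List.mem_map.mp ha
          have hlb := pv_enum_fst_lb t (i + 1) q hq
          have hq2 := List.all_eq_true.mp hall q hq
          rcases (Bool.or_eq_true _ _).mp hq2 with hc | hc
          · have : i = q.1 := by simpa using hc
            omega
          · rw [← hqa]; simp only [Bool.not_eq_true'] at hc; simp [hc]
        omega
      · intro hcount
        have h0 : t.countP P = 0 := by omega
        rw [List.countP_eq_zero] at h0
        rw [List.all_eq_true]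
        intro q hq
        have := h0 q.2 (pv_mem_of_mem_enum hq)
        simp [this]
    · have hw : w ∈ t := pv_mem_of_mem_enum (q := (i, w)) h
      have hpos : 0 < t.countP P := by
        rcases Nat.eq_zero_or_pos (t.countP P) with h0 | h0
        · rw [List.countP_eq_zero] at h0; exact absurd hP (h0 w hw)
        · exact h0
      have hlb := pv_enum_fst_lb t (s + 1) _ h
      have hine : (i == s) = false := by
        simp only [beq_eq_false_iff_ne, ne_eq]
        intro hc; rw [hc] at hlb; omega
      rw [Bool.and_eq_true, ih (s + 1) i w h hP]
      by_cases hx : P x = true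
      · simp only [hine, hx, Bool.false_or, Bool.not_true, reduceIte,
          Bool.false_eq_true, false_and, false_iff]
        omega
      · simp only [Bool.not_eq_true] at hx
        simp [hine, hx]

-- the common filter predicate: the word's sorted-letter signature occurs exactly once
def pvKeep (wl : List String) (x : String) : Bool :=
  wl.countP (fun u => pvSig u == pvSig x) == 1

-- the counting dictionary of remove_anagram computes signature multiplicities
lemma pv_adict_getD (wl : List String) (v : String) :
    (wl.foldl
      (fun d word =>
        let word_sorted := pvSortLetters word
        if !d.contains word_sorted then d.insert word_sorted 1
        else d.insert word_sorted (d.getD word_sorted 0 + 1))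
      PySem.Dict.empty).getD v 0 = ((wl.map pvSortLetters).count v : Int) := by
  have hstep : (fun (d : PySem.Dict String Int) (word : String) =>
        let word_sorted := pvSortLetters word
        if !d.contains word_sorted then d.insert word_sorted 1
        else d.insert word_sorted (d.getD word_sorted 0 + 1))
      = (fun d word => d.insert (pvSortLetters word) (d.getD (pvSortLetters word) 0 + 1)) := by
    funext d word
    by_cases h : d.contains (pvSortLetters word)
    · simp [h]
    · simp only [Bool.not_eq_true] at h
      simp [h, PySem.Dict.getD_of_not_contains _ _ h]
  have hmap := List.foldl_map (f := pvSortLetters)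
    (g := fun (d : PySem.Dict String Int) x => d.insert x (d.getD x 0 + 1))
    (l := wl) (init := PySem.Dict.empty)
  rw [hstep, ← hmap, PySem.Dict.getD_foldl_insert_add_one]
  simp [PySem.Dict.getD, PySem.Dict.get?, PySem.Dict.empty]

lemma pv_clean_eq (wl : List String) :
    remove_anagram wl = wl.filter (pvKeep wl) := by
  unfold remove_anagram
  dsimp only
  apply List.filter_congr
  intro x _
  rw [pv_adict_getD]
  have hc : (wl.map pvSortLetters).count (pvSortLetters x)
      = wl.countP (fun u => pvSig u == pvSig x) := by
    rw [List.count_eq_countP, List.countP_map]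
    congr 1
    funext u
    show (pvSortLetters u == pvSortLetters x) = (pvSig u == pvSig x)
    simp [pvSortLetters, pvSig, String.ofList_inj]
  rw [hc]
  unfold pvKeep
  simp

-- the length-bucketing step of A equals the unconditional setdefault/append step of B
lemma pv_bucket_step_eq :
    (fun (d : PySem.Dict Int (List String)) (word : String) =>
      let length := PySem.Str.len word
      if d.contains length then d.modify length [] (fun g => g ++ [word])
      else d.insert length [word])
    = (fun (d : PySem.Dict Int (List String)) (word : String) =>
        d.modify (PySem.Str.len word) [] (fun g => g ++ [word])) := by
  funext d word
  dsimp only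
  by_cases h : d.contains (PySem.Str.len word) = true
  · rw [if_pos h]
  · rw [if_neg h]
    have h' : d.contains (PySem.Str.len word) = false := by
      cases hb : d.contains (PySem.Str.len word)
      · rfl
      · exact absurd hb h
    rw [PySem.Dict.modify, PySem.Dict.getD_of_not_contains _ _ h']
    simp

lemma pv_alt_eq (wl : List String) :
    process_word_list_alt wl
      = ((wl.filter (pvKeep wl)).foldl
          (fun (d : PySem.Dict Int (List String)) word =>
            d.modify (PySem.Str.len word) [] (fun g => g ++ [word]))
          PySem.Dict.empty).items := by
  unfold process_word_list_alt
  congr 1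
  rw [← List.foldl_filter]
  have hcong : (PySem.List.enumerate wl 0).filter
      (fun p => (PySem.List.enumerate wl 0).all (fun q => p.1 == q.1 || !(pvSig q.2 == pvSig p.2)))
      = (PySem.List.enumerate wl 0).filter (fun p => pvKeep wl p.2) := by
    apply List.filter_congr
    intro p hp
    obtain ⟨i, w⟩ := p
    have hiff := pv_all_iff_countP_one (fun u => pvSig u == pvSig w) wl 0 i w hp (by simp)
    rw [Bool.eq_iff_iff, hiff]
    unfold pvKeep
    simp [beq_iff_eq]
  rw [hcong]
  have hfm : ∀ K : String → Bool,
      wl.filter K = ((PySem.List.enumerate wl 0).filter (fun p => K p.2)).map (·.2) := by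
    intro K
    conv_lhs => rw [← pv_enum_map_snd wl 0]
    rw [List.filter_map]
    rfl
  rw [hfm (pvKeep wl), List.foldl_map]

-- ===== VERDICT (by name: the statement is the Claim_ definition above) =====
theorem process_word_list_spec : Claim_equal_process_word_list := by
  intro wl _hdom
  unfold Spec_process_word_list process_word_list
  rw [pv_clean_eq, pv_bucket_step_eq, pv_alt_eq]
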